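-- pv_equiv track=rewrite | github.com/Vignesh-1101/DSA-PYTHON | Python/hashmap.py | max_training_result
-- ===== SOURCE A (Python) =====
-- import math
--
-- def max_training_result(d, n):
--     # Initialize maximum GCD
--     max_gcd = 0
--
--     # Iterate through all possible divisions of `d` into `n` days
--     for i in range(1, n + 1):
--         if d % i == 0:  # Check if `d` can be divided into `i` parts evenly
--             # Divide the difficulty into `i` parts and calculate the GCD of the parts
--             part_difficulty = d // i
--             gcd = math.gcd(part_difficulty, i)
--             max_gcd = max(max_gcd, gcd)
--
--     return max_gcd
-- ===== SOURCE B (Python) =====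
-- import math
--
-- def max_training_result(d, n):
--     # Enumerate only divisors of |d| via sqrt factorization instead of scanning 1..n.
--     a = abs(d)
--     if a == 0:
--         return n if n > 0 else 0
--     best = 0
--     for j in range(1, math.isqrt(a) + 1):
--         if a % j == 0:
--             for i in (j, a // j):
--                 if i <= n:
--                     best = max(best, math.gcd(a // i, i))
--     return best
-- ===== Notes on version B (the rewrite author's own statement) =====
-- stated objective: faster
-- what changed: B enumerates only the divisors of |d| up to sqrt(|d|) (taking each divisor and its cofactor, keeping those <= n) instead of scanning every i in 1..n, handling d == 0 directly.
import Mathlib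
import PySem

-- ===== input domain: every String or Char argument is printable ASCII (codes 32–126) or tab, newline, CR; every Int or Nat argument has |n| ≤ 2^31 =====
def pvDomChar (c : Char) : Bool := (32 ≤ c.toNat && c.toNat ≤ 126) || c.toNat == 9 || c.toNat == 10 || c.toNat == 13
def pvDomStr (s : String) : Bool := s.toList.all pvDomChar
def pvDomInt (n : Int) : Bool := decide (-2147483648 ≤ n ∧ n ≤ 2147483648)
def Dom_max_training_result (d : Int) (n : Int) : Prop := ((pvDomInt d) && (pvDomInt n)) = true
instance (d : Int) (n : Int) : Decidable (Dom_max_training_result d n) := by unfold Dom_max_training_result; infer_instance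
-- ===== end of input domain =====

-- B enumerates only the divisors of |d| up to isqrt(|d|) (each divisor and its cofactor, keeping those ≤ n) instead of scanning 1..n; return values proved equal.

-- ===== PORT A =====
-- A: for i in range(1, n+1): if d % i == 0: max_gcd = max(max_gcd, math.gcd(d // i, i))
def max_training_result (d : Int) (n : Int) : Int :=
  (PySem.List.pyRange 1 (n + 1) 1).foldl
    (fun max_gcd i =>
      if PySem.Int.mod d i = 0 then
        max max_gcd ((Int.gcd (PySem.Int.floordiv d i) i : Nat) : Int)
      else max_gcd) 0

-- ===== PORT B =====
-- B: a = abs(d); if a == 0: return n if n > 0 else 0;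
--    for j in range(1, isqrt(a)+1): if a % j == 0: for i in (j, a // j): if i <= n: best = max(best, gcd(a // i, i))
def max_training_result_alt (d : Int) (n : Int) : Int :=
  let a : Int := if d < 0 then -d else d
  if a = 0 then (if n > 0 then n else 0)
  else
    (PySem.List.pyRange 1 ((Nat.sqrt a.toNat : Int) + 1) 1).foldl
      (fun best j =>
        if PySem.Int.mod a j = 0 then
          [j, PySem.Int.floordiv a j].foldl
            (fun best i =>
              if i ≤ n then max best ((Int.gcd (PySem.Int.floordiv a i) i : Nat) : Int)
              else best) best
        else best) 0

-- ===== PRECONDITION & SPEC =====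
def Spec_max_training_result (d : Int) (n : Int) (out : Int) : Prop := out = max_training_result_alt d n
instance (d : Int) (n : Int) (out : Int) : Decidable (Spec_max_training_result d n out) := by unfold Spec_max_training_result; infer_instance

-- ===== CLAIM (what is proved, stated in full; the proofs are below) =====
def Claim_equal_max_training_result : Prop := ∀ (d : Int) (n : Int), Dom_max_training_result d n → Spec_max_training_result d n (max_training_result d n)

-- ===== LEMMAS AND PROOFS =====

-- the common candidate value: gcd(a // i, i) for a divisor i ≥ 1 of a (Euclidean / = Python // there)
def pvVal (a i : Int) : Int := ((Int.gcd (a / i) i : Nat) : Int)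

-- B's inner and outer loop bodies, named for the proofs
def pvStepB (a n m i : Int) : Int :=
  if i ≤ n then max m ((Int.gcd (PySem.Int.floordiv a i) i : Nat) : Int) else m

def pvOuterB (a n m j : Int) : Int :=
  if PySem.Int.mod a j = 0 then pvStepB a n (pvStepB a n m j) (PySem.Int.floordiv a j) else m

-- generic facts about a "running max" style fold
theorem pvFoldGe {α : Type} (h : Int → α → Int) (hmono : ∀ m x, m ≤ h m x) :
    ∀ (L : List α) (m : Int), m ≤ L.foldl h m := by
  intro L
  induction L with
  | nil => intro m; simp
  | cons x t ih => intro m; exact le_trans (hmono m x) (ih (h m x))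

theorem pvFoldBound {α : Type} (h : Int → α → Int) (P : α → Int → Prop)
    (hmono : ∀ m x, m ≤ h m x) (hp : ∀ m x v, P x v → v ≤ h m x) :
    ∀ (L : List α) (m : Int) (x : α), x ∈ L → ∀ v, P x v → v ≤ L.foldl h m := by
  intro L
  induction L with
  | nil => simp
  | cons y t ih =>
    intro m x hx v hv
    rcases List.mem_cons.mp hx with rfl | hx
    · exact le_trans (hp m x v hv) (pvFoldGe h hmono t _)
    · exact ih _ x hx v hv

theorem pvFoldReach {α : Type} (h : Int → α → Int) (Q : α → Int → Prop)
    (hq : ∀ m x, h m x = m ∨ Q x (h m x)) :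
    ∀ (L : List α) (m : Int), L.foldl h m = m ∨ ∃ x ∈ L, Q x (L.foldl h m) := by
  intro L
  induction L with
  | nil => intro m; left; rfl
  | cons y t ih =>
    intro m
    rcases ih (h m y) with he | ⟨x, hx, hQ⟩
    · rcases hq m y with h1 | h1
      · left; simpa [h1] using he
      · right
        exact ⟨y, List.mem_cons_self, by simpa [he] using h1⟩
    · right; exact ⟨x, List.mem_cons_of_mem y hx, hQ⟩

-- A's candidate value equals pvVal |d| i for a positive divisor i of d
theorem pvVal_eq (d i : Int) (h1 : 1 ≤ i) (h3 : i ∣ d) :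
    ((Int.gcd (PySem.Int.floordiv d i) i : Nat) : Int) = pvVal |d| i := by
  obtain ⟨k, rfl⟩ := h3
  have hi : (0:Int) < i := by omega
  rw [PySem.Int.floordiv_eq_ediv_of_pos hi]
  unfold pvVal
  rw [Int.mul_ediv_cancel_left k (by omega), abs_mul, abs_of_pos hi,
    Int.mul_ediv_cancel_left |k| (by omega)]
  simp [Int.gcd, Int.natAbs_abs]

theorem pvVal_floordiv (a i : Int) (h : 0 < i) :
    ((Int.gcd (PySem.Int.floordiv a i) i : Nat) : Int) = pvVal a i := by
  unfold pvVal
  rw [PySem.Int.floordiv_eq_ediv_of_pos h]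

-- ---- A-side spec ----
theorem pvA_ge (d n : Int) : 0 ≤ max_training_result d n := by
  unfold max_training_result
  refine pvFoldGe _ (fun m x => ?_) _ 0
  split_ifs
  · exact le_max_left _ _
  · exact le_rfl

theorem pvA_bound (d n i : Int) (h1 : 1 ≤ i) (h2 : i ≤ n) (h3 : i ∣ d) :
    ((Int.gcd (PySem.Int.floordiv d i) i : Nat) : Int) ≤ max_training_result d n := by
  unfold max_training_result
  have hmono : ∀ (m x : Int),
      m ≤ (if PySem.Int.mod d x = 0 then
        max m ((Int.gcd (PySem.Int.floordiv d x) x : Nat) : Int) else m) := by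
    intro m x; split_ifs
    · exact le_max_left _ _
    · exact le_rfl
  have hp : ∀ (m x v : Int),
      (PySem.Int.mod d x = 0 ∧ v = ((Int.gcd (PySem.Int.floordiv d x) x : Nat) : Int)) →
      v ≤ (if PySem.Int.mod d x = 0 then
        max m ((Int.gcd (PySem.Int.floordiv d x) x : Nat) : Int) else m) := by
    rintro m x v ⟨hc, rfl⟩
    rw [if_pos hc]
    exact le_max_right _ _
  exact pvFoldBound _
    (fun x v => PySem.Int.mod d x = 0 ∧ v = ((Int.gcd (PySem.Int.floordiv d x) x : Nat) : Int))
    hmono hp _ 0 i ((PySem.List.mem_pyRange_one).mpr ⟨h1, by omega⟩) _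
    ⟨(PySem.Int.mod_eq_zero_iff_dvd d i).mpr h3, rfl⟩

theorem pvA_reach (d n : Int) :
    max_training_result d n = 0 ∨
      ∃ i, 1 ≤ i ∧ i ≤ n ∧ i ∣ d ∧
        max_training_result d n = ((Int.gcd (PySem.Int.floordiv d i) i : Nat) : Int) := by
  unfold max_training_result
  have hq : ∀ (m x : Int),
      (if PySem.Int.mod d x = 0 then
        max m ((Int.gcd (PySem.Int.floordiv d x) x : Nat) : Int) else m) = m ∨
      (PySem.Int.mod d x = 0 ∧
        (if PySem.Int.mod d x = 0 then
          max m ((Int.gcd (PySem.Int.floordiv d x) x : Nat) : Int) else m) =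
          ((Int.gcd (PySem.Int.floordiv d x) x : Nat) : Int)) := by
    intro m x
    split_ifs with hc
    · rcases max_choice m ((Int.gcd (PySem.Int.floordiv d x) x : Nat) : Int) with h | h
      · exact Or.inl h
      · exact Or.inr ⟨hc, h⟩
    · exact Or.inl rfl
  rcases pvFoldReach _
      (fun x r => PySem.Int.mod d x = 0 ∧ r = ((Int.gcd (PySem.Int.floordiv d x) x : Nat) : Int))
      hq (PySem.List.pyRange 1 (n + 1) 1) 0 with h0 | ⟨x, hx, hc, hr⟩
  · exact Or.inl h0
  · obtain ⟨hm1, hm2⟩ := (PySem.List.mem_pyRange_one).mp hx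
    exact Or.inr ⟨x, hm1, by omega, (PySem.Int.mod_eq_zero_iff_dvd d x).mp hc, hr⟩

-- ---- divisor-pair arithmetic ----
theorem pvCofactorI (a j : Int) (ha : 0 < a) (hj : 1 ≤ j) (hd : j ∣ a) :
    1 ≤ a / j ∧ (a / j) ∣ a := by
  obtain ⟨k, rfl⟩ := hd
  rw [Int.mul_ediv_cancel_left k (by omega)]
  have hk : 0 < k := by nlinarith
  exact ⟨hk, dvd_mul_left k j⟩

theorem pvSqrtCoverI (a i : Int) (ha : 0 < a) (hi : 1 ≤ i) (hd : i ∣ a) :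
    ∃ j : Int, 1 ≤ j ∧ j ≤ ((Nat.sqrt a.toNat : Nat) : Int) ∧ j ∣ a ∧ (i = j ∨ i = a / j) := by
  by_cases hs : i ≤ ((Nat.sqrt a.toNat : Nat) : Int)
  · exact ⟨i, hi, hs, hd, Or.inl rfl⟩
  · obtain ⟨A, rfl⟩ : ∃ A : Nat, a = (A : Int) := ⟨a.toNat, by omega⟩
    obtain ⟨I, rfl⟩ : ∃ I : Nat, i = (I : Int) := ⟨i.toNat, by omega⟩
    simp only [Int.toNat_natCast] at hs ⊢
    have hIA : I ∣ A := Int.natCast_dvd_natCast.mp hd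
    have hApos : 0 < A := by omega
    have hIpos : 0 < I := by omega
    have hmul : I * (A / I) = A := Nat.mul_div_cancel' hIA
    have hIs : Nat.sqrt A < I := by omega
    have hAlt : A < I * I := Nat.sqrt_lt.mp hIs
    have hJlt : A / I < I := by nlinarith [hmul]
    have hJpos : 0 < A / I := by
      rcases Nat.eq_zero_or_pos (A / I) with h0 | h0
      · rw [h0, Nat.mul_zero] at hmul; omega
      · exact h0
    have hJs : A / I ≤ Nat.sqrt A := Nat.le_sqrt.mpr (by nlinarith [hmul])
    have hJA : A / I ∣ A := ⟨I, (Nat.div_mul_cancel hIA).symm⟩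
    have hAJ : A / (A / I) = I := by
      calc A / (A / I) = I * (A / I) / (A / I) := by rw [hmul]
        _ = I := Nat.mul_div_cancel _ hJpos
    refine ⟨((A / I : Nat) : Int), by omega, by omega, Int.natCast_dvd_natCast.mpr hJA, Or.inr ?_⟩
    rw [← Int.natCast_ediv, hAJ]

-- ---- B-side spec ----
theorem pvStepB_mono (a n m i : Int) : m ≤ pvStepB a n m i := by
  unfold pvStepB
  split_ifs
  · exact le_max_left _ _
  · exact le_rfl

theorem pvStepB_le (a n m i : Int) (h : i ≤ n) :
    ((Int.gcd (PySem.Int.floordiv a i) i : Nat) : Int) ≤ pvStepB a n m i := by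
  unfold pvStepB
  rw [if_pos h]
  exact le_max_right _ _

theorem pvOuterB_mono (a n m j : Int) : m ≤ pvOuterB a n m j := by
  unfold pvOuterB
  split_ifs
  · exact le_trans (pvStepB_mono a n m j) (pvStepB_mono a n _ _)
  · exact le_rfl

theorem pvB_abs (d : Int) : (if d < 0 then -d else d) = |d| := by
  split_ifs with h
  · rw [abs_of_neg h]
  · rw [abs_of_nonneg (by omega)]

theorem pvB_eq (d n : Int) (hd : d ≠ 0) :
    max_training_result_alt d n =
      (PySem.List.pyRange 1 ((Nat.sqrt (|d|).toNat : Int) + 1) 1).foldl (pvOuterB |d| n) 0 := by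
  unfold max_training_result_alt pvOuterB pvStepB
  simp only [pvB_abs]
  rw [if_neg (abs_ne_zero.mpr hd)]
  rfl

theorem pvB_ge (d n : Int) : 0 ≤ max_training_result_alt d n := by
  by_cases hd : d = 0
  · subst hd
    unfold max_training_result_alt
    norm_num
    split_ifs <;> omega
  · rw [pvB_eq d n hd]
    exact pvFoldGe _ (fun m j => pvOuterB_mono |d| n m j) _ 0

theorem pvB_bound (d n i : Int) (hd : d ≠ 0) (h1 : 1 ≤ i) (h2 : i ≤ n) (h3 : i ∣ |d|) :
    pvVal |d| i ≤ max_training_result_alt d n := by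
  have ha : (0:Int) < |d| := abs_pos.mpr hd
  obtain ⟨j, hj1, hjs, hjd, hji⟩ := pvSqrtCoverI |d| i ha h1 h3
  have hfdj : PySem.Int.floordiv |d| j = |d| / j :=
    PySem.Int.floordiv_eq_ediv_of_pos (by omega)
  rw [pvB_eq d n hd]
  have hp : ∀ (m x v : Int),
      (PySem.Int.mod |d| x = 0 ∧
        ((1 ≤ x ∧ x ≤ n ∧ v = pvVal |d| x) ∨
         (1 ≤ PySem.Int.floordiv |d| x ∧ PySem.Int.floordiv |d| x ≤ n ∧
          v = pvVal |d| (PySem.Int.floordiv |d| x)))) →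
      v ≤ pvOuterB |d| n m x := by
    rintro m x v ⟨hc, hcase⟩
    unfold pvOuterB
    rw [if_pos hc]
    rcases hcase with ⟨hx1, hxn, rfl⟩ | ⟨hf1, hfn, rfl⟩
    · have hv : pvVal |d| x ≤ pvStepB |d| n m x := by
        rw [← pvVal_floordiv |d| x (by omega)]
        exact pvStepB_le |d| n m x hxn
      exact le_trans hv (pvStepB_mono |d| n _ _)
    · rw [← pvVal_floordiv |d| _ (by omega)]
      exact pvStepB_le |d| n _ _ hfn
  refine pvFoldBound (pvOuterB |d| n)
      (fun x v => PySem.Int.mod |d| x = 0 ∧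
        ((1 ≤ x ∧ x ≤ n ∧ v = pvVal |d| x) ∨
         (1 ≤ PySem.Int.floordiv |d| x ∧ PySem.Int.floordiv |d| x ≤ n ∧
          v = pvVal |d| (PySem.Int.floordiv |d| x))))
      (fun m x => pvOuterB_mono |d| n m x) hp _ 0 j
      ((PySem.List.mem_pyRange_one).mpr ⟨hj1, by omega⟩) _
      ⟨(PySem.Int.mod_eq_zero_iff_dvd _ _).mpr hjd, ?_⟩
  rcases hji with rfl | hco
  · exact Or.inl ⟨h1, h2, rfl⟩
  · refine Or.inr ⟨?_, ?_, ?_⟩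
    · rw [hfdj, ← hco]; exact h1
    · rw [hfdj, ← hco]; exact h2
    · rw [hfdj, ← hco]

theorem pvB_reach (d n : Int) (hd : d ≠ 0) :
    max_training_result_alt d n = 0 ∨
      ∃ i, 1 ≤ i ∧ i ≤ n ∧ i ∣ |d| ∧ max_training_result_alt d n = pvVal |d| i := by
  have ha : (0:Int) < |d| := abs_pos.mpr hd
  rw [pvB_eq d n hd]
  have hq : ∀ (m x : Int),
      pvOuterB |d| n m x = m ∨
      (PySem.Int.mod |d| x = 0 ∧
        ((x ≤ n ∧ pvOuterB |d| n m x = ((Int.gcd (PySem.Int.floordiv |d| x) x : Nat) : Int)) ∨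
         (PySem.Int.floordiv |d| x ≤ n ∧
          pvOuterB |d| n m x =
            ((Int.gcd (PySem.Int.floordiv |d| (PySem.Int.floordiv |d| x))
              (PySem.Int.floordiv |d| x) : Nat) : Int)))) := by
    intro m x
    unfold pvOuterB pvStepB
    by_cases hc : PySem.Int.mod |d| x = 0
    · rw [if_pos hc]
      by_cases h1 : x ≤ n
      · rw [if_pos h1]
        by_cases h2 : PySem.Int.floordiv |d| x ≤ n
        · rw [if_pos h2]
          rcases max_choice (max m ((Int.gcd (PySem.Int.floordiv |d| x) x : Nat) : Int))
              ((Int.gcd (PySem.Int.floordiv |d| (PySem.Int.floordiv |d| x))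
                (PySem.Int.floordiv |d| x) : Nat) : Int) with hA | hA
          · rw [hA]
            rcases max_choice m ((Int.gcd (PySem.Int.floordiv |d| x) x : Nat) : Int) with hB | hB
            · rw [hB]; exact Or.inl rfl
            · rw [hB]; exact Or.inr ⟨hc, Or.inl ⟨h1, rfl⟩⟩
          · rw [hA]; exact Or.inr ⟨hc, Or.inr ⟨h2, rfl⟩⟩
        · rw [if_neg h2]
          rcases max_choice m ((Int.gcd (PySem.Int.floordiv |d| x) x : Nat) : Int) with hB | hB
          · rw [hB]; exact Or.inl rfl
          · rw [hB]; exact Or.inr ⟨hc, Or.inl ⟨h1, rfl⟩⟩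
      · rw [if_neg h1]
        by_cases h2 : PySem.Int.floordiv |d| x ≤ n
        · rw [if_pos h2]
          rcases max_choice m
              ((Int.gcd (PySem.Int.floordiv |d| (PySem.Int.floordiv |d| x))
                (PySem.Int.floordiv |d| x) : Nat) : Int) with hA | hA
          · rw [hA]; exact Or.inl rfl
          · rw [hA]; exact Or.inr ⟨hc, Or.inr ⟨h2, rfl⟩⟩
        · rw [if_neg h2]; exact Or.inl rfl
    · rw [if_neg hc]; exact Or.inl rfl
  rcases pvFoldReach (pvOuterB |d| n)
      (fun x r => PySem.Int.mod |d| x = 0 ∧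
        ((x ≤ n ∧ r = ((Int.gcd (PySem.Int.floordiv |d| x) x : Nat) : Int)) ∨
         (PySem.Int.floordiv |d| x ≤ n ∧
          r = ((Int.gcd (PySem.Int.floordiv |d| (PySem.Int.floordiv |d| x))
            (PySem.Int.floordiv |d| x) : Nat) : Int))))
      hq (PySem.List.pyRange 1 ((Nat.sqrt (|d|).toNat : Int) + 1) 1) 0 with h0 | ⟨x, hx, hc, hcase⟩
  · exact Or.inl h0
  · obtain ⟨hm1, _⟩ := (PySem.List.mem_pyRange_one).mp hx
    have hxd : x ∣ |d| := (PySem.Int.mod_eq_zero_iff_dvd _ _).mp hc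
    have hfdx : PySem.Int.floordiv |d| x = |d| / x :=
      PySem.Int.floordiv_eq_ediv_of_pos (by omega)
    obtain ⟨hcopos, hcodvd⟩ := pvCofactorI |d| x ha hm1 hxd
    rcases hcase with ⟨hxn, hr⟩ | ⟨hxn, hr⟩
    · refine Or.inr ⟨x, hm1, hxn, hxd, ?_⟩
      rw [hr, pvVal_floordiv |d| x (by omega)]
    · refine Or.inr ⟨|d| / x, hcopos, by omega, hcodvd, ?_⟩
      rw [hr, hfdx, pvVal_floordiv |d| _ (by omega)]

-- ---- main equality ----
theorem pvMain (d n : Int) : max_training_result d n = max_training_result_alt d n := by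
  by_cases hd : d = 0
  · subst hd
    have hB : max_training_result_alt 0 n = if 0 < n then n else 0 := by
      unfold max_training_result_alt
      norm_num
    rw [hB]
    by_cases hn : 0 < n
    · rw [if_pos hn]
      have hval : ((Int.gcd (PySem.Int.floordiv 0 n) n : Nat) : Int) = n := by
        rw [PySem.Int.floordiv_eq_ediv_of_pos hn, Int.zero_ediv]
        simp [Int.gcd, abs_of_pos hn]
      have hlow := pvA_bound 0 n n hn le_rfl (dvd_zero n)
      rw [hval] at hlow
      rcases pvA_reach 0 n with h0 | ⟨i, hi1, hi2, _, heq⟩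
      · omega
      · have hvi : ((Int.gcd (PySem.Int.floordiv 0 i) i : Nat) : Int) = i := by
          rw [PySem.Int.floordiv_eq_ediv_of_pos (by omega : (0:Int) < i), Int.zero_ediv]
          simp [Int.gcd, abs_of_pos (by omega : (0:Int) < i)]
        rw [hvi] at heq
        omega
    · rw [if_neg hn]
      unfold max_training_result
      rw [PySem.List.pyRange_one_eq_nil (by omega)]
      rfl
  · apply le_antisymm
    · rcases pvA_reach d n with h0 | ⟨i, hi1, hi2, hdvd, heq⟩
      · rw [h0]; exact pvB_ge d n
      · rw [heq, pvVal_eq d i hi1 hdvd]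
        exact pvB_bound d n i hd hi1 hi2 ((dvd_abs i d).mpr hdvd)
    · rcases pvB_reach d n hd with h0 | ⟨i, hi1, hi2, hdvd, heq⟩
      · rw [h0]; exact pvA_ge d n
      · rw [heq, ← pvVal_eq d i hi1 ((dvd_abs i d).mp hdvd)]
        exact pvA_bound d n i hi1 hi2 ((dvd_abs i d).mp hdvd)

-- ===== VERDICT (by name: the statement is the Claim_ definition above) =====
theorem max_training_result_spec : Claim_equal_max_training_result := by
  intro d n _
  unfold Spec_max_training_result
  exact pvMain d n
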